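-- pv_equiv track=rewrite | github.com/AdrienJ0/Cancerous_Tissues_Classification | sgd_classification.py | BetterTuple
-- ===== SOURCE A (Python) =====
-- def BetterTuple(patch_type_tuple) :
--     patch_type_tuple_better =[]
--     count = 0
--
--     for elem in patch_type_tuple:
--
--         if elem[2] == 'ABC':
--             count += 1
--
--         if count == 3:
--             count = 0
--         else:
--             patch_type_tuple_better.append(elem)
--
--     return patch_type_tuple_better
-- ===== SOURCE B (Python) =====
-- def BetterTuple(patch_type_tuple):
--     abc_positions = [i for i, elem in enumerate(patch_type_tuple) if elem[2] == 'ABC']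
--     skip = {p for r, p in enumerate(abc_positions) if r % 3 == 2}
--     return [elem for i, elem in enumerate(patch_type_tuple) if i not in skip]
-- ===== Notes on version B (the rewrite author's own statement) =====
-- stated objective: alternative
-- what changed: B replaces A's inline running counter with a two-phase decomposition: it first builds the list of indices of 'ABC' elements, takes every third of them as a skip set, and then filters the list by index membership.
import Mathlib
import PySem

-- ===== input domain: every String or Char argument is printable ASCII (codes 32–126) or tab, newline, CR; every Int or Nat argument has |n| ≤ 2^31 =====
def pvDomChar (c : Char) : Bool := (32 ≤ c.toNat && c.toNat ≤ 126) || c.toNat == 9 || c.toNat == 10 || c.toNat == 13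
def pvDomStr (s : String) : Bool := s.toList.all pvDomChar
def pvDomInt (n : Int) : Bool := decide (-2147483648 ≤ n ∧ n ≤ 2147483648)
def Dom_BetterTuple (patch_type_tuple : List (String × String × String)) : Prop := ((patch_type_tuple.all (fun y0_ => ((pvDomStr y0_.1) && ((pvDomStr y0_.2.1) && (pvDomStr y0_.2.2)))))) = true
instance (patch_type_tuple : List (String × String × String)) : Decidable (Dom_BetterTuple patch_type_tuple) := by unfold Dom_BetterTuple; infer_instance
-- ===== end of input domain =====

-- B builds an index of ABC positions and filters by a skip set instead of A's inline running counter; objective: alternative decomposition (same cost).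


-- ===== PORT A =====
def BetterTuple (patch_type_tuple : List (String × String × String)) : List (String × String × String) :=
  (patch_type_tuple.foldl
    (fun (st : List (String × String × String) × Int) elem =>
      let count : Int := if elem.2.2 == "ABC" then st.2 + 1 else st.2
      if count == 3 then (st.1, 0) else (st.1 ++ [elem], count))
    ([], 0)).1

-- ===== PORT B =====
def BetterTuple_alt (patch_type_tuple : List (String × String × String)) : List (String × String × String) :=
  let abc_positions : List Int :=
    ((PySem.List.enumerate patch_type_tuple).filter (fun p => p.2.2.2 == "ABC")).map (fun p => p.1)
  let skip : PySem.Set Int :=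
    PySem.Set.ofList (((PySem.List.enumerate abc_positions).filter
      (fun q => PySem.Int.mod q.1 3 == 2)).map (fun q => q.2))
  ((PySem.List.enumerate patch_type_tuple).filter (fun p => !(PySem.Set.contains skip p.1))).map (fun p => p.2)

-- ===== PRECONDITION & SPEC =====
def Spec_BetterTuple (patch_type_tuple : List (String × String × String)) (out : List (String × String × String)) : Prop := out = BetterTuple_alt patch_type_tuple
instance (patch_type_tuple : List (String × String × String)) (out : List (String × String × String)) : Decidable (Spec_BetterTuple patch_type_tuple out) := by unfold Spec_BetterTuple; infer_instance

-- ===== CLAIM (what is proved, stated in full; the proofs are below) =====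
def Claim_equal_BetterTuple : Prop := ∀ (patch_type_tuple : List (String × String × String)), Dom_BetterTuple patch_type_tuple → Spec_BetterTuple patch_type_tuple (BetterTuple patch_type_tuple)

-- ===== LEMMAS AND PROOFS =====

-- reference recursion: A's loop body written structurally (count c carried down)
def keepF : List (String × String × String) → Int → List (String × String × String)
  | [], _ => []
  | e :: r, c =>
    let c' : Int := if e.2.2 == "ABC" then c + 1 else c
    if c' == 3 then keepF r 0 else e :: keepF r c'

-- the indices B's skip set must contain, computed structurally (s = next index, ρ = ABC rank so far)
def skipIdx : List (String × String × String) → Int → Nat → List Int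
  | [], _, _ => []
  | e :: r, s, ρ =>
    if e.2.2 == "ABC" then
      (if ρ % 3 = 2 then [s] else []) ++ skipIdx r (s + 1) (ρ + 1)
    else skipIdx r (s + 1) ρ

theorem skipIdx_lb (l : List (String × String × String)) (s : Int) (ρ : Nat) :
    ∀ x ∈ skipIdx l s ρ, s ≤ x := by
  induction l generalizing s ρ with
  | nil => simp [skipIdx]
  | cons e r ih =>
    intro x hx
    simp only [skipIdx] at hx
    split at hx
    · rcases List.mem_append.1 hx with h | h
      · split at h <;> simp at h; omega
      · have := ih (s + 1) (ρ + 1) x h; omega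
    · have := ih (s + 1) ρ x hx; omega

theorem foldA (l : List (String × String × String)) (acc : List (String × String × String)) (c : Int) :
    (l.foldl
      (fun (st : List (String × String × String) × Int) elem =>
        let count : Int := if elem.2.2 == "ABC" then st.2 + 1 else st.2
        if count == 3 then (st.1, 0) else (st.1 ++ [elem], count))
      (acc, c)).1 = acc ++ keepF l c := by
  induction l generalizing acc c with
  | nil => simp [keepF]
  | cons e r ih =>
    simp only [List.foldl_cons, keepF]
    by_cases habc : e.2.2 == "ABC"
    · by_cases hc : c + 1 = (3 : Int)
      · simp [habc, hc] at ih ⊢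
        exact ih acc 0
      · simp [habc, hc] at ih ⊢
        rw [ih]; simp
    · by_cases hc : c = (3 : Int)
      · simp [habc, hc] at ih ⊢
        exact ih acc 0
      · simp [habc, hc] at ih ⊢
        rw [ih]; simp

theorem abc_skip (l : List (String × String × String)) (s : Int) (ρ : Nat) :
    ((PySem.List.enumerate
        (((PySem.List.enumerate l s).filter (fun p => p.2.2.2 == "ABC")).map (fun p => p.1))
        (ρ : Int)).filter (fun q => PySem.Int.mod q.1 3 == 2)).map (fun q => q.2)
      = skipIdx l s ρ := by
  induction l generalizing s ρ with
  | nil => simp [PySem.List.enumerate_nil, skipIdx]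
  | cons e r ih =>
    by_cases habc : e.2.2 == "ABC"
    · have hcast : ((ρ : Int) + 1) = ((ρ + 1 : Nat) : Int) := by push_cast; ring
      have hmods : PySem.Int.mod (ρ : Int) 3 = ((ρ % 3 : Nat) : Int) := by
        rw [PySem.Int.mod_eq_emod_of_pos (by norm_num)]; omega
      by_cases h2 : ρ % 3 = 2
      · have hm2 : (PySem.Int.mod (ρ : Int) 3 == 2) = true := by
          rw [hmods, h2]; norm_num
        simp only [PySem.List.enumerate_cons, List.filter_cons, habc, if_pos, List.map_cons,
          skipIdx, hm2, h2]
        rw [hcast, ih]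
        simp
      · have hm2 : (PySem.Int.mod (ρ : Int) 3 == 2) = false := by
          rw [hmods]
          have : ¬(((ρ % 3 : Nat) : Int) = 2) := by omega
          simpa using this
        simp only [PySem.List.enumerate_cons, List.filter_cons, habc, if_pos, List.map_cons,
          skipIdx, hm2, h2]
        simp only [Bool.false_eq_true, if_neg, not_false_iff]
        rw [hcast, ih, List.nil_append]
    · simp only [PySem.List.enumerate_cons, List.filter_cons, habc, skipIdx]
      simp only [Bool.false_eq_true, if_neg, not_false_iff]
      exact ih (s + 1) ρ

theorem main_keep (l : List (String × String × String)) (s : Int) (ρ : Nat) :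
    ((PySem.List.enumerate l s).filter
        (fun p => !(decide (p.1 ∈ skipIdx l s ρ)))).map (fun p => p.2)
      = keepF l ((ρ % 3 : Nat) : Int) := by
  induction l generalizing s ρ with
  | nil => simp [PySem.List.enumerate_nil, keepF]
  | cons e r ih =>
    have hge : ∀ p ∈ PySem.List.enumerate r (s + 1), s + 1 ≤ p.1 := by
      intro p hp
      rcases (PySem.List.mem_enumerate_iff _ _ _).1 hp with ⟨k, hk, rfl⟩
      omega
    by_cases habc : e.2.2 == "ABC"
    · by_cases h2 : ρ % 3 = 2
      · -- e is the 3rd ABC since the last reset: dropped by both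
        have htail : (PySem.List.enumerate r (s + 1)).filter
              (fun p => !(decide (p.1 ∈ skipIdx (e :: r) s ρ)))
            = (PySem.List.enumerate r (s + 1)).filter
              (fun p => !(decide (p.1 ∈ skipIdx r (s + 1) (ρ + 1)))) := by
          apply List.filter_congr
          intro p hp
          have hps := hge p hp
          simp only [skipIdx, habc, if_pos, h2, List.singleton_append, List.mem_cons]
          have : ¬(p.1 = s) := by omega
          simp [this]
        have hc : (((ρ % 3 : Nat) : Int) + 1 == 3) = true := by
          have : ((ρ % 3 : Nat) : Int) + 1 = 3 := by omega
          simpa using this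
        have hc0 : (((ρ + 1) % 3 : Nat) : Int) = 0 := by
          have h0 : (ρ + 1) % 3 = 0 := by omega
          simp [h0]
        have hhead : (!(decide ((s, e).1 ∈ skipIdx (e :: r) s ρ))) = false := by
          simp [skipIdx, habc, h2]
        simp only [PySem.List.enumerate_cons, List.filter_cons, keepF, habc, if_pos, hc]
        rw [hhead]
        simp only [Bool.false_eq_true, if_neg, not_false_iff]
        rw [htail, ih (s + 1) (ρ + 1), hc0]
      · -- an ABC, but not the 3rd: kept, counter advances
        have htail : (PySem.List.enumerate r (s + 1)).filter
              (fun p => !(decide (p.1 ∈ skipIdx (e :: r) s ρ)))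
            = (PySem.List.enumerate r (s + 1)).filter
              (fun p => !(decide (p.1 ∈ skipIdx r (s + 1) (ρ + 1)))) := by
          apply List.filter_congr
          intro p hp
          simp [skipIdx, habc, h2]
        have hhead : (!(decide ((s, e).1 ∈ skipIdx (e :: r) s ρ))) = true := by
          simp only [skipIdx, habc, if_pos, h2, if_false, List.nil_append, Bool.not_eq_true',
            decide_eq_false_iff_not]
          intro hmem
          have hsm := skipIdx_lb r (s + 1) (ρ + 1) s (by simpa [h2] using hmem)
          omega
        have hc : (((ρ % 3 : Nat) : Int) + 1 == 3) = false := by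
          have : ¬(((ρ % 3 : Nat) : Int) + 1 = 3) := by omega
          simpa using this
        have hc1 : (((ρ + 1) % 3 : Nat) : Int) = ((ρ % 3 : Nat) : Int) + 1 := by
          have h1 : (ρ + 1) % 3 = ρ % 3 + 1 := by omega
          rw [h1]; push_cast; ring
        simp only [PySem.List.enumerate_cons, List.filter_cons, keepF, habc, if_pos, hc]
        rw [hhead]
        simp only [if_true, List.map_cons]
        rw [htail, ih (s + 1) (ρ + 1), hc1, if_neg (by simp : ¬(false = true))]
    · -- not an ABC: kept, counter unchanged
      have htail : (PySem.List.enumerate r (s + 1)).filter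
            (fun p => !(decide (p.1 ∈ skipIdx (e :: r) s ρ)))
          = (PySem.List.enumerate r (s + 1)).filter
            (fun p => !(decide (p.1 ∈ skipIdx r (s + 1) ρ))) := by
        apply List.filter_congr
        intro p hp
        simp [skipIdx, habc]
      have hhead : (!(decide ((s, e).1 ∈ skipIdx (e :: r) s ρ))) = true := by
        simp only [skipIdx, habc, Bool.false_eq_true, if_false, Bool.not_eq_true',
          decide_eq_false_iff_not]
        intro hmem
        have hsm := skipIdx_lb r (s + 1) ρ s hmem
        omega
      have hc : (((ρ % 3 : Nat) : Int) == 3) = false := by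
        have : ¬(((ρ % 3 : Nat) : Int) = 3) := by omega
        simpa using this
      simp only [PySem.List.enumerate_cons, List.filter_cons, keepF, habc, Bool.false_eq_true,
        if_false, hc]
      rw [hhead]
      simp only [if_true, List.map_cons]
      rw [htail, ih (s + 1) ρ]

-- ===== VERDICT (by name: the statement is the Claim_ definition above) =====
theorem BetterTuple_spec : Claim_equal_BetterTuple := by
  intro l _
  unfold Spec_BetterTuple BetterTuple BetterTuple_alt
  rw [foldA l [] 0]
  simp only [List.nil_append]
  have hS := abc_skip l 0 0
  simp only [Nat.cast_zero] at hS
  rw [hS]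
  have hfc : ((PySem.List.enumerate l).filter
        (fun p => !(PySem.Set.contains (PySem.Set.ofList (skipIdx l 0 0)) p.1)))
      = ((PySem.List.enumerate l).filter (fun p => !(decide (p.1 ∈ skipIdx l 0 0)))) := by
    apply List.filter_congr
    intro p _
    by_cases h : p.1 ∈ skipIdx l 0 0 <;>
      simp [h, PySem.Set.mem_ofList]
  rw [hfc]
  have := main_keep l 0 0
  simp only [Nat.zero_mod, Nat.cast_zero] at this
  rw [this]
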